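-- pv_equiv track=rewrite | github.com/YuriiOks/mlx-w3-mnist-transformer | utils/tokenizer_utils.py | sequence_to_labels
-- ===== SOURCE A (Python) =====
-- PAD_TOKEN_ID = 0
--
-- START_TOKEN_ID = 1
--
-- END_TOKEN_ID = 2
--
-- DIGIT_OFFSET = 3
--
-- def sequence_to_labels(
--     token_ids: list[int],
--     start_token_id: int = START_TOKEN_ID,
--     end_token_id: int = END_TOKEN_ID,
--     pad_token_id: int = PAD_TOKEN_ID
-- ) -> list[int]:
--     """
--     Convert a sequence of token IDs back to digit labels, stopping at the first
--     <end> or <pad> token.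
--
--     Args:
--         token_ids (list[int]): Sequence of token IDs from model output.
--         start_token_id (int): Token ID for the start token.
--         end_token_id (int): Token ID for the end token.
--         pad_token_id (int): Token ID for the padding token.
--
--     Returns:
--         list[int]: Decoded digit labels (0-9) as a list.
--     """
--     labels = []
--     for token_id in token_ids:
--         if token_id == start_token_id:
--             continue  # Skip start token
--         if token_id == end_token_id or token_id == pad_token_id:
--             break  # Stop decoding
--         digit_label = token_id - DIGIT_OFFSET
--         if 0 <= digit_label <= 9:
--             labels.append(digit_label)
--         else:
--             # Handle unexpected tokens if necessary (e.g., log warning)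
--             pass
--     return labels
-- ===== SOURCE B (Python) =====
-- PAD_TOKEN_ID = 0
-- START_TOKEN_ID = 1
-- END_TOKEN_ID = 2
-- DIGIT_OFFSET = 3
--
-- def sequence_to_labels(
--     token_ids: list[int],
--     start_token_id: int = START_TOKEN_ID,
--     end_token_id: int = END_TOKEN_ID,
--     pad_token_id: int = PAD_TOKEN_ID
-- ) -> list[int]:
--     # Staged decoding: (1) locate the cut position = first terminator that is
--     # not a start token, (2) slice the sequence there, (3) decode the slice
--     # through a precomputed token->digit lookup table.
--     table = {DIGIT_OFFSET + d: d for d in range(10)}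
--     cut = next((i for i, t in enumerate(token_ids)
--                 if t != start_token_id and (t == end_token_id or t == pad_token_id)),
--                len(token_ids))
--     return [table[t] for t in token_ids[:cut]
--             if t != start_token_id and t in table]
-- ===== Notes on version B (the rewrite author's own statement) =====
-- stated objective: alternative
-- what changed: Replaces A's fused accumulator loop (continue/break/append with offset arithmetic) by a staged pipeline: first find the cut index with next() over enumerate, then slice the list there, then decode the slice through a precomputed token->digit dict table.
import Mathlib
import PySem

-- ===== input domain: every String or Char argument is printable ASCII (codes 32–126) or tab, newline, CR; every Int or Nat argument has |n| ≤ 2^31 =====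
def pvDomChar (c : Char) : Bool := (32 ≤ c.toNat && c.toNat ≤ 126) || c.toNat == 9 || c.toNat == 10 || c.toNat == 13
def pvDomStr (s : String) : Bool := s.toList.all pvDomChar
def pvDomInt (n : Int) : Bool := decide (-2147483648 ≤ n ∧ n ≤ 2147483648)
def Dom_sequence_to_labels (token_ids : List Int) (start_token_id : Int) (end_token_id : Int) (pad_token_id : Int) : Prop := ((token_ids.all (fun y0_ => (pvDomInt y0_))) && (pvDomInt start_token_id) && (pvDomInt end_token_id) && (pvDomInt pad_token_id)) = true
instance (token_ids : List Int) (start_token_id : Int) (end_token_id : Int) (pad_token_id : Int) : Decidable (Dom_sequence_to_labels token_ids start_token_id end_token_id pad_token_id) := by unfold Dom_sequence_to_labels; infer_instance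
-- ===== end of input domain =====

-- B restages A's fused accumulator loop as a pipeline: find the cut index with next() over enumerate, slice there, decode the slice via a precomputed dict table; objective: alternative.

-- ===== PORT A =====
-- A's loop over token_ids with accumulator `labels`, `continue` on start, `break` on end/pad.
def seqAGo (s e p : Int) (labels : List Int) : List Int → List Int
  | [] => labels
  | t :: ts =>
      if t = s then seqAGo s e p labels ts                 -- continue: skip start token
      else if t = e ∨ t = p then labels                    -- break: stop decoding
      else if 0 ≤ t - 3 ∧ t - 3 ≤ 9 then seqAGo s e p (labels ++ [t - 3]) ts
      else seqAGo s e p labels ts                          -- unexpected token: pass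

def sequence_to_labels (token_ids : List Int) (start_token_id : Int) (end_token_id : Int) (pad_token_id : Int) : List Int :=
  seqAGo start_token_id end_token_id pad_token_id [] token_ids

-- ===== PORT B =====
-- `table = {DIGIT_OFFSET + d: d for d in range(10)}`: the token -> digit lookup table.
def digitTable : PySem.Dict Int Int :=
  (PySem.List.pyRange 0 10 1).foldl (fun d k => d.insert (3 + k) k) PySem.Dict.empty

-- `next((i for i, t in enumerate(token_ids) if t != s and (t == e or t == p)), default)`:
-- hand port (exact): scan left to right carrying the enumerate counter st, return the
-- first index whose token satisfies the condition; none = generator exhausted (.getD supplies the default).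
def firstTerm (s e p : Int) (st : Int) : List Int → Option Int
  | [] => none
  | t :: ts => if t ≠ s ∧ (t = e ∨ t = p) then some st else firstTerm s e p (st + 1) ts

-- `[table[t] for t in token_ids[:cut] if t != start and t in table]` is a filterMap:
-- the guard `t in table` makes `table[t]` exactly `get?` (KeyError unreachable).
def sequence_to_labels_alt (token_ids : List Int) (start_token_id : Int) (end_token_id : Int) (pad_token_id : Int) : List Int :=
  (PySem.List.slice token_ids none
      (some ((firstTerm start_token_id end_token_id pad_token_id 0 token_ids).getD (token_ids.length : Int)))).filterMap
    (fun t => if t = start_token_id then none else digitTable.get? t)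

-- ===== PRECONDITION & SPEC =====
def Spec_sequence_to_labels (token_ids : List Int) (start_token_id : Int) (end_token_id : Int) (pad_token_id : Int) (out : List Int) : Prop := out = sequence_to_labels_alt token_ids start_token_id end_token_id pad_token_id
instance (token_ids : List Int) (start_token_id : Int) (end_token_id : Int) (pad_token_id : Int) (out : List Int) : Decidable (Spec_sequence_to_labels token_ids start_token_id end_token_id pad_token_id out) := by unfold Spec_sequence_to_labels; infer_instance

-- ===== CLAIM (what is proved, stated in full; the proofs are below) =====
def Claim_equal_sequence_to_labels : Prop := ∀ (token_ids : List Int) (start_token_id : Int) (end_token_id : Int) (pad_token_id : Int), Dom_sequence_to_labels token_ids start_token_id end_token_id pad_token_id → Spec_sequence_to_labels token_ids start_token_id end_token_id pad_token_id (sequence_to_labels token_ids start_token_id end_token_id pad_token_id)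

-- ===== LEMMAS AND PROOFS =====

-- the scan predicate both proofs reduce to: the token does NOT terminate A's loop
def pvPred (s e p t : Int) : Bool := t == s || (t != e && t != p)

-- A's loop invariant: the accumulator loop is acc ++ (takeWhile, filter, map).
theorem seqAGo_eq (s e p : Int) (ts : List Int) : ∀ acc : List Int,
    seqAGo s e p acc ts =
      acc ++ ((ts.takeWhile (pvPred s e p)).filter
        (fun t => decide (t ≠ s ∧ 0 ≤ t - 3 ∧ t - 3 ≤ 9))).map (fun t => t - 3) := by
  induction ts with
  | nil => intro acc; simp [seqAGo]
  | cons t ts ih =>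
      intro acc
      by_cases hs : t = s
      · simp [seqAGo, pvPred, hs, ih]
      · by_cases hb : t = e ∨ t = p
        · have he : pvPred s e p t = false := by
            rcases hb with rfl | rfl <;> simp [pvPred, hs]
          simp only [List.takeWhile_cons, he, Bool.false_eq_true, if_false,
            List.filter_nil, List.map_nil, List.append_nil]
          simp [seqAGo, hs, hb]
        · have he : pvPred s e p t = true := by
            have h := not_or.mp hb
            simp [pvPred, hs, h.1, h.2]
          simp only [List.takeWhile_cons, he, if_true, List.filter_cons]
          by_cases hd : 0 ≤ t - 3 ∧ t - 3 ≤ 9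
          · have hd' : decide (t ≠ s ∧ 0 ≤ t - 3 ∧ t - 3 ≤ 9) = true := decide_eq_true ⟨hs, hd⟩
            simp only [hd', if_true, List.map_cons]
            simp only [seqAGo, if_neg hs, if_neg hb, if_pos hd, ih,
              List.append_assoc, List.singleton_append]
          · have hd' : decide (t ≠ s ∧ 0 ≤ t - 3 ∧ t - 3 ≤ 9) = false := by
              simp only [decide_eq_false_iff_not]; exact fun h => hd h.2
            simp only [hd', Bool.false_eq_true, if_false]
            simp only [seqAGo, if_neg hs, if_neg hb, if_neg hd, ih]

-- the lookup table answers exactly on tokens 3..12, with value t - 3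
theorem digitTable_get? (t : Int) :
    digitTable.get? t = if 3 ≤ t ∧ t ≤ 12 then some (t - 3) else none := by
  have h : digitTable = PySem.Dict.mk
      [(3,0),(4,1),(5,2),(6,3),(7,4),(8,5),(9,6),(10,7),(11,8),(12,9)] := by decide
  rw [h]
  simp only [PySem.Dict.get?_mk_cons]
  split_ifs <;> simp_all [PySem.Dict.get?] <;> omega

-- the cut index returned by next(..., len(token_ids)) is the length of the takeWhile prefix
theorem firstTerm_getD (s e p : Int) (ts : List Int) : ∀ st : Int,
    (firstTerm s e p st ts).getD (st + (ts.length : Int)) =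
      st + ((ts.takeWhile (pvPred s e p)).length : Int) := by
  induction ts with
  | nil => intro st; simp [firstTerm]
  | cons t ts ih =>
      intro st
      by_cases hc : t ≠ s ∧ (t = e ∨ t = p)
      · have he : pvPred s e p t = false := by
          rcases hc.2 with rfl | rfl <;> simp [pvPred, hc.1]
        simp [firstTerm, if_pos hc, he]
      · have he : pvPred s e p t = true := by
          by_cases hs : t = s
          · simp [pvPred, hs]
          · rcases not_and_or.mp hc with h | h
            · exact absurd (not_not.mp h) hs
            · have := not_or.mp h
              simp [pvPred, hs, this.1, this.2]
        have hih := ih (st + 1)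
        have harith : st + ((t :: ts).length : Int) = (st + 1) + (ts.length : Int) := by
          simp [List.length_cons]; ring
        rw [harith]
        simp only [firstTerm, if_neg hc, List.takeWhile_cons, he, if_true,
          List.length_cons, hih]
        push_cast
        ring

-- filterMap with a guard-shaped function is filter-then-map
theorem filterMap_eq_map_filter {A B : Type} (f : A → Option B) (p : A → Bool) (g : A → B)
    (h : ∀ t, f t = if p t then some (g t) else none) (l : List A) :
    l.filterMap f = (l.filter p).map g := by
  induction l with
  | nil => simp
  | cons t l ih =>
      rw [List.filterMap_cons, List.filter_cons, h t]
      by_cases hp : p t = true <;> simp [hp, ih]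

-- the guarded table comprehension is the filter-then-map of the reference pipeline
theorem filterMap_table (s : Int) (l : List Int) :
    l.filterMap (fun t => if t = s then none else digitTable.get? t) =
      (l.filter (fun t => decide (t ≠ s ∧ 0 ≤ t - 3 ∧ t - 3 ≤ 9))).map (fun t => t - 3) := by
  refine filterMap_eq_map_filter _ _ _ (fun t => ?_) l
  by_cases hs : t = s
  · simp [hs]
  · rw [if_neg hs, digitTable_get?]
    by_cases hq : t ≠ s ∧ 0 ≤ t - 3 ∧ t - 3 ≤ 9
    · rw [if_pos (show 3 ≤ t ∧ t ≤ 12 by omega), if_pos (decide_eq_true hq)]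
    · rw [if_neg (fun hr : 3 ≤ t ∧ t ≤ 12 => hq ⟨hs, by omega, by omega⟩),
        if_neg (fun h => hq (of_decide_eq_true h))]

-- B equals the reference pipeline
theorem alt_eq (ts : List Int) (s e p : Int) :
    sequence_to_labels_alt ts s e p =
      ((ts.takeWhile (pvPred s e p)).filter
        (fun t => decide (t ≠ s ∧ 0 ≤ t - 3 ∧ t - 3 ≤ 9))).map (fun t => t - 3) := by
  have hcut : (firstTerm s e p 0 ts).getD (ts.length : Int) =
      ((ts.takeWhile (pvPred s e p)).length : Int) := by
    have := firstTerm_getD s e p ts 0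
    simpa using this
  have hslice : PySem.List.slice ts none
      (some ((ts.takeWhile (pvPred s e p)).length : Int)) = ts.takeWhile (pvPred s e p) := by
    rw [PySem.List.slice_to_natCast]
    exact (List.prefix_iff_eq_take.mp (List.takeWhile_prefix _)).symm
  unfold sequence_to_labels_alt
  rw [hcut, hslice, filterMap_table]

-- ===== VERDICT (by name: the statement is the Claim_ definition above) =====
theorem sequence_to_labels_spec : Claim_equal_sequence_to_labels := by
  intro ts s e p _
  unfold Spec_sequence_to_labels sequence_to_labels
  rw [alt_eq]
  simpa using seqAGo_eq s e p ts []
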